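-- pv_equiv track=rewrite | github.com/asd790320224/Doro_Repacker_EX | Z0___get_raw_files.py | keep_up_to_third_separator
-- ===== SOURCE A (Python) =====
-- def keep_up_to_third_separator(name: str) -> str:
--     count = 0
--     for i, ch in enumerate(name):
--         if ch == '-' or ch == '_':
--             count += 1
--             if count == 3:
--                 return name[:i]
--     return name
-- ===== SOURCE B (Python) =====
-- def keep_up_to_third_separator(name: str) -> str:
--     # Tokenize into alternating segments and captured separators (like
--     # re.split(r'([-_])', name)); separators sit at odd indices 1,3,5, so
--     # joining the first 5 parts keeps everything before the third separator.
--     parts = ['']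
--     for ch in name:
--         if ch == '-' or ch == '_':
--             parts.append(ch)
--             parts.append('')
--         else:
--             parts[-1] += ch
--     return ''.join(parts[:5])
-- ===== Notes on version B (the rewrite author's own statement) =====
-- stated objective: alternative
-- what changed: B tokenizes the string into an alternating parts list of segments and captured separators (a split-with-captures pass) and joins the first five parts, instead of A's counting scan with an early-return slice of the original string.
import Mathlib
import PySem

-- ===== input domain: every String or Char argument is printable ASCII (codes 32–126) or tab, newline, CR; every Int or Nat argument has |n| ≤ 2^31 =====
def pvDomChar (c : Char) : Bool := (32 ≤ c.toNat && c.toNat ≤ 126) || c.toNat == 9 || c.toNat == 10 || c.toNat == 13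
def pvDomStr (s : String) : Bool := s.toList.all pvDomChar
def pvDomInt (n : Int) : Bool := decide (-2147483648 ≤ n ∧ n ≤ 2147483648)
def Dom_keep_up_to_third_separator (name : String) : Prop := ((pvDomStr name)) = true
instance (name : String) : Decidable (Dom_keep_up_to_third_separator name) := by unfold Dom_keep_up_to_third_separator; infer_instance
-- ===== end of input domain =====

-- B tokenizes the string into an alternating parts list (segments / captured separators)
-- and joins the first five parts, replacing A's counting scan with an early-return slice.

-- ===== PORT A =====
-- A's for-loop over enumerate(name) with the running count, early return name[:i] at the third separator.
def keepA_go (name : List Char) : List (Int × Char) → Int → List Char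
  | [], _ => name
  | (i, ch) :: rest, count =>
    if ch = '-' ∨ ch = '_' then
      if count + 1 = 3 then PySem.List.slice name none (some i)
      else keepA_go name rest (count + 1)
    else keepA_go name rest count

def keep_up_to_third_separator (name : String) : String :=
  String.ofList (keepA_go name.toList (PySem.List.enumerate name.toList 0) 0)

-- ===== PORT B =====
-- Source B's loop body: append [ch, ''] on a separator, else extend the last part with ch.
def tokStep (parts : List (List Char)) (ch : Char) : List (List Char) :=
  if ch = '-' ∨ ch = '_' then parts ++ [[ch], []]
  else parts.dropLast ++ [parts.getLastD [] ++ [ch]]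

def keep_up_to_third_separator_alt (name : String) : String :=
  String.ofList (((name.toList.foldl tokStep [[]]).take 5).flatten)

-- ===== PRECONDITION & SPEC =====
def Spec_keep_up_to_third_separator (name : String) (out : String) : Prop := out = keep_up_to_third_separator_alt name
instance (name : String) (out : String) : Decidable (Spec_keep_up_to_third_separator name out) := by unfold Spec_keep_up_to_third_separator; infer_instance

-- ===== CLAIM (what is proved, stated in full; the proofs are below) =====
def Claim_equal_keep_up_to_third_separator : Prop := ∀ (name : String), Dom_keep_up_to_third_separator name → Spec_keep_up_to_third_separator name (keep_up_to_third_separator name)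

-- ===== LEMMAS AND PROOFS =====

-- Recursive (front-to-back) description of the parts list B builds.
def tok : List Char → List (List Char)
  | [] => [[]]
  | c :: rest =>
    if c = '-' ∨ c = '_' then [] :: [c] :: tok rest
    else
      match tok rest with
      | [] => [[c]]
      | t :: ts => (c :: t) :: ts

lemma tok_ne_nil (cs : List Char) : tok cs ≠ [] := by
  cases cs with
  | nil => simp [tok]
  | cons c r =>
    unfold tok
    split
    · simp
    · cases h : tok r <;> simp

def mergeHead (cur : List Char) : List (List Char) → List (List Char)
  | [] => [cur]
  | t :: ts => (cur ++ t) :: ts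

-- B's foldl with a nonempty accumulator computes tok of the remaining input.
lemma foldl_tokStep (cs : List Char) : ∀ (acc : List (List Char)) (cur : List Char),
    List.foldl tokStep (acc ++ [cur]) cs = acc ++ mergeHead cur (tok cs) := by
  induction cs with
  | nil => intro acc cur; simp [tok, mergeHead]
  | cons c rest ih =>
    intro acc cur
    by_cases hsep : c = '-' ∨ c = '_'
    · have hstep : tokStep (acc ++ [cur]) c = (acc ++ [cur] ++ [[c]]) ++ [[]] := by
        simp [tokStep, hsep]
      rw [List.foldl_cons, hstep, ih]
      obtain ⟨t, ts, ht⟩ := List.exists_cons_of_ne_nil (tok_ne_nil rest)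
      simp [tok, hsep, ht, mergeHead]
    · have hstep : tokStep (acc ++ [cur]) c = acc ++ [cur ++ [c]] := by
        simp [tokStep, hsep]
      rw [List.foldl_cons, hstep, ih]
      obtain ⟨t, ts, ht⟩ := List.exists_cons_of_ne_nil (tok_ne_nil rest)
      simp [tok, hsep, ht, mergeHead]

-- A's loop after having consumed prefix p (k separators seen so far, k ≤ 2)
-- returns p followed by the first 5-2k parts of the tokenization of the rest.
lemma keepA_tok (cs : List Char) : ∀ (p : List Char) (k : Nat), k ≤ 2 →
    keepA_go (p ++ cs) (PySem.List.enumerate cs (p.length : Int)) (k : Int)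
      = p ++ ((tok cs).take (5 - 2 * k)).flatten := by
  induction cs with
  | nil =>
    intro p k hk
    have h5 : 5 - 2 * k = (4 - 2 * k) + 1 := by omega
    simp [PySem.List.enumerate_nil, keepA_go, tok, h5]
  | cons c rest ih =>
    intro p k hk
    rw [PySem.List.enumerate_cons]
    by_cases hsep : c = '-' ∨ c = '_'
    · by_cases hk2 : k = 2
      · subst hk2
        have : ((2 : Nat) : Int) + 1 = 3 := by norm_num
        simp only [keepA_go, hsep, if_true, this]
        rw [PySem.List.slice_to_natCast]
        simp [tok, hsep]
      · have hne : ((k : Nat) : Int) + 1 ≠ 3 := by omega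
        have hcast : ((k : Nat) : Int) + 1 = ((k + 1 : Nat) : Int) := by push_cast; ring
        have hlen : (p.length : Int) + 1 = ((p ++ [c]).length : Int) := by simp
        simp only [keepA_go, hsep, if_true]
        rw [if_neg hne, hcast, hlen]
        have := ih (p ++ [c]) (k + 1) (by omega)
        simp only [List.append_assoc, List.singleton_append] at this
        rw [this]
        obtain ⟨t, ts, ht⟩ := List.exists_cons_of_ne_nil (tok_ne_nil rest)
        have h5 : 5 - 2 * k = (5 - 2 * (k + 1)) + 1 + 1 := by omega
        simp [tok, hsep, ht, h5, List.take_succ_cons]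
    · have hlen : (p.length : Int) + 1 = ((p ++ [c]).length : Int) := by simp
      simp only [keepA_go, hsep, if_false, hlen]
      have := ih (p ++ [c]) k hk
      simp only [List.append_assoc, List.singleton_append] at this
      rw [this]
      obtain ⟨t, ts, ht⟩ := List.exists_cons_of_ne_nil (tok_ne_nil rest)
      have h5 : ∃ m, 5 - 2 * k = m + 1 := ⟨4 - 2 * k, by omega⟩
      obtain ⟨m, hm⟩ := h5
      simp [tok, hsep, ht, hm, List.take_succ_cons]

-- ===== VERDICT (by name: the statement is the Claim_ definition above) =====
theorem keep_up_to_third_separator_spec : Claim_equal_keep_up_to_third_separator := by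
  intro name _
  unfold Spec_keep_up_to_third_separator keep_up_to_third_separator keep_up_to_third_separator_alt
  have hA := keepA_tok name.toList [] 0 (by omega)
  simp only [List.nil_append, List.length_nil, Nat.cast_zero, Nat.mul_zero, Nat.sub_zero] at hA
  have hB := foldl_tokStep name.toList [] []
  simp only [List.nil_append] at hB
  obtain ⟨t, ts, ht⟩ := List.exists_cons_of_ne_nil (tok_ne_nil name.toList)
  rw [hA, hB, ht]
  simp [mergeHead]
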